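-- pv_equiv track=rewrite | github.com/charsh01/CSE-538_TermProject | committess_parser.py | parse_custom_line
-- ===== SOURCE A (Python) =====
-- def parse_custom_line(line):
--     parts = []
--     current = ''
--     inside_pipe = False
--     i = 0
--     while i < len(line):
--         char = line[i]
--         if char == '|':
--             inside_pipe = not inside_pipe
--             i += 1
--             continue
--         elif char == ',' and not inside_pipe:
--             parts.append(current)
--             current = ''
--         else:
--             current += char
--         i += 1
--     parts.append(current)
--     return parts
-- ===== SOURCE B (Python) =====
-- def parse_custom_line(line):
--     # Split on '|' first; even-indexed segments are outside pipe regions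
--     # (split on commas), odd-indexed are inside (commas stay literal).
--     return _assemble(line.split('|'), False)
--
-- def _assemble(segments, inside):
--     if not segments:
--         return ['']
--     seg, rest = segments[0], segments[1:]
--     tail = _assemble(rest, not inside)
--     if inside:
--         return [seg + tail[0]] + tail[1:]
--     sub = seg.split(',')
--     return sub[:-1] + [sub[-1] + tail[0]] + tail[1:]
-- ===== Notes on version B (the rewrite author's own statement) =====
-- stated objective: faster
-- what changed: Replaces the char-by-char state machine (toggling inside_pipe and growing current by repeated string concatenation) with a split-on-'|' decomposition: segments alternate outside/inside, outside segments are split on commas and stitched at the seams by structural recursion.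
import Mathlib
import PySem

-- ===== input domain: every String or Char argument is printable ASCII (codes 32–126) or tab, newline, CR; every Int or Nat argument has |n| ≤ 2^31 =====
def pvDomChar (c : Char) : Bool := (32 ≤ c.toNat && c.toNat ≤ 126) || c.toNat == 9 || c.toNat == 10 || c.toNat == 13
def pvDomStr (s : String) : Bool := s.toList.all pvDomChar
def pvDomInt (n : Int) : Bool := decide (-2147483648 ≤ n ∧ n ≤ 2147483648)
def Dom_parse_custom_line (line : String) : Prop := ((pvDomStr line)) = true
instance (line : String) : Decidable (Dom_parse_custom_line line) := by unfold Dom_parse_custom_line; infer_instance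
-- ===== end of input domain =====

-- B replaces the char-by-char state machine with split-on-'|' + parity recursion; a timing run measured B faster (A grows strings by repeated concatenation).


-- ===== PORT A =====
-- the while loop over i, with state (parts, current, inside_pipe), as structural recursion over the chars
def parseLoopA : List Char → List (List Char) → List Char → Bool → List (List Char)
  | [], parts, current, _ => parts ++ [current]
  | c :: cs, parts, current, inside =>
    if c = '|' then parseLoopA cs parts current (!inside)
    else if c = ',' ∧ inside = false then parseLoopA cs (parts ++ [current]) [] inside
    else parseLoopA cs parts (current ++ [c]) inside

def parse_custom_line (line : String) : List String :=
  (parseLoopA line.toList [] [] false).map String.ofList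

-- ===== PORT B =====
-- s.split(sep) for a one-char separator, hand-ported (exact for single-char sep): never drops empties, '' ↦ ['']
def splitC (sep : Char) : List Char → List (List Char)
  | [] => [[]]
  | c :: cs =>
    if c = sep then [] :: splitC sep cs
    else List.modifyHead (c :: ·) (splitC sep cs)

-- _assemble(segments, inside); tail is always nonempty (see assembleB_ne_nil below), so tail[0]/tail[1:] are headD/tail
def assembleB : List (List Char) → Bool → List (List Char)
  | [], _ => [[]]
  | seg :: rest, inside =>
    let tail := assembleB rest (!inside)
    if inside then (seg ++ tail.headD []) :: tail.tail
    else
      let sub := splitC ',' seg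
      sub.dropLast ++ (sub.getLastD [] ++ tail.headD []) :: tail.tail

def parse_custom_line_alt (line : String) : List String :=
  (assembleB (splitC '|' line.toList) false).map String.ofList

-- ===== PRECONDITION & SPEC =====
def Spec_parse_custom_line (line : String) (out : List String) : Prop := out = parse_custom_line_alt line
instance (line : String) (out : List String) : Decidable (Spec_parse_custom_line line out) := by unfold Spec_parse_custom_line; infer_instance

-- ===== CLAIM (what is proved, stated in full; the proofs are below) =====
def Claim_equal_parse_custom_line : Prop := ∀ (line : String), Dom_parse_custom_line line → Spec_parse_custom_line line (parse_custom_line line)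

-- ===== LEMMAS AND PROOFS =====

theorem splitC_ne_nil (sep : Char) (cs : List Char) : splitC sep cs ≠ [] := by
  cases cs with
  | nil => simp [splitC]
  | cons c cs =>
    simp only [splitC]
    split
    · simp
    · cases h : splitC sep cs with
      | nil => exact absurd h (splitC_ne_nil sep cs)
      | cons x xs => simp [List.modifyHead]

theorem assembleB_ne_nil (segs : List (List Char)) (inside : Bool) : assembleB segs inside ≠ [] := by
  cases segs with
  | nil => simp [assembleB]
  | cons s rest =>
    simp only [assembleB]
    split
    · simp
    · simp

-- "glue sub onto tail": the false-branch expression of assembleB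
def glueE (S t : List (List Char)) : List (List Char) :=
  S.dropLast ++ (S.getLastD [] ++ t.headD []) :: t.tail

theorem glueE_nil_cons (S t : List (List Char)) (h : S ≠ []) :
    glueE ([] :: S) t = [] :: glueE S t := by
  cases S with
  | nil => exact absurd rfl h
  | cons x xs => simp [glueE]

theorem glueE_modifyHead (c : Char) (S t : List (List Char)) (h : S ≠ []) :
    glueE (List.modifyHead (c :: ·) S) t = List.modifyHead (c :: ·) (glueE S t) := by
  cases S with
  | nil => exact absurd rfl h
  | cons x xs =>
    cases xs with
    | nil => simp [glueE, List.modifyHead]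
    | cons y ys => simp [glueE, List.modifyHead]

theorem glueE_empty (t : List (List Char)) (h : t ≠ []) : glueE [[]] t = t := by
  cases t with
  | nil => exact absurd rfl h
  | cons x xs => simp [glueE]

theorem modifyHead_eq_self (t : List (List Char)) (h : t ≠ []) :
    ([] ++ t.headD []) :: t.tail = t := by
  cases t with
  | nil => exact absurd rfl h
  | cons x xs => simp

theorem assembleB_false (seg : List Char) (rest : List (List Char)) (inside : Bool)
    (h : inside = false) :
    assembleB (seg :: rest) inside = glueE (splitC ',' seg) (assembleB rest (!inside)) := by
  subst h; simp [assembleB, glueE]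

theorem assembleB_true (seg : List Char) (rest : List (List Char)) (inside : Bool)
    (h : inside = true) :
    assembleB (seg :: rest) inside =
      (seg ++ (assembleB rest (!inside)).headD []) :: (assembleB rest (!inside)).tail := by
  subst h; simp [assembleB]

-- main invariant: A's loop state versus B's split-and-assemble of the remaining chars
theorem parse_key (cs : List Char) :
    ∀ (parts : List (List Char)) (current : List Char) (inside : Bool),
      parseLoopA cs parts current inside =
        parts ++ (current ++ (assembleB (splitC '|' cs) inside).headD []) ::
                 (assembleB (splitC '|' cs) inside).tail := by
  induction cs with
  | nil => intro parts current inside; cases inside <;> simp [parseLoopA, splitC, assembleB]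
  | cons c cs ih =>
    intro parts current inside
    by_cases hp : c = '|'
    · subst hp
      rw [show parseLoopA ('|' :: cs) parts current inside
            = parseLoopA cs parts current (!inside) by simp [parseLoopA]]
      rw [ih]
      have hsp : splitC '|' ('|' :: cs) = [] :: splitC '|' cs := by simp [splitC]
      rw [hsp]
      cases hi : inside
      · rw [assembleB_false [] (splitC '|' cs) false rfl]
        have : splitC ',' ([] : List Char) = [[]] := by simp [splitC]
        rw [this, glueE_empty _ (assembleB_ne_nil _ _)]
      · rw [assembleB_true [] (splitC '|' cs) true rfl]
        simp
    · have hsp : splitC '|' (c :: cs) = List.modifyHead (c :: ·) (splitC '|' cs) := by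
        simp [splitC, hp]
      obtain ⟨h, rest, hrest⟩ : ∃ h rest, splitC '|' cs = h :: rest := by
        cases hE : splitC '|' cs with
        | nil => exact absurd hE (splitC_ne_nil _ _)
        | cons x xs => exact ⟨x, xs, rfl⟩
      by_cases hc : c = ',' ∧ inside = false
      · obtain ⟨hc1, hc2⟩ := hc
        subst hc1; subst hc2
        rw [show parseLoopA (',' :: cs) parts current false
              = parseLoopA cs (parts ++ [current]) [] false by simp [parseLoopA, hp]]
        rw [ih]
        rw [hsp, hrest]
        simp only [List.modifyHead]
        rw [assembleB_false (',' :: h) rest false rfl,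
            assembleB_false h rest false rfl]
        have hsc : splitC ',' (',' :: h) = [] :: splitC ',' h := by simp [splitC]
        rw [hsc, glueE_nil_cons _ _ (splitC_ne_nil _ _)]
        have hg : glueE (splitC ',' h) (assembleB rest (!false)) ≠ [] := by
          unfold glueE
          intro hcon
          simpa using congrArg List.length hcon
        rw [modifyHead_eq_self _ hg]
        simp
      · -- else branch: current += c
        rw [show parseLoopA (c :: cs) parts current inside
              = parseLoopA cs parts (current ++ [c]) inside by
            simp [parseLoopA, hp, hc]]
        rw [ih]
        rw [hsp, hrest]
        simp only [List.modifyHead]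
        cases hi : inside
        · rw [assembleB_false (c :: h) rest false rfl,
              assembleB_false h rest false rfl]
          have hsc : splitC ',' (c :: h) = List.modifyHead (c :: ·) (splitC ',' h) := by
            have hcc : c ≠ ',' := by
              intro hh; exact hc ⟨hh, hi⟩
            simp [splitC, hcc]
          rw [hsc, glueE_modifyHead _ _ _ (splitC_ne_nil _ _)]
          cases hGE : glueE (splitC ',' h) (assembleB rest (!false)) with
          | nil =>
            exfalso
            unfold glueE at hGE
            simpa using congrArg List.length hGE
          | cons g gs => simp [List.modifyHead]
        · rw [assembleB_true (c :: h) rest true rfl,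
              assembleB_true h rest true rfl]
          simp

theorem parse_custom_line_eq (line : String) :
    parse_custom_line line = parse_custom_line_alt line := by
  unfold parse_custom_line parse_custom_line_alt
  rw [parse_key]
  rw [modifyHead_eq_self _ (assembleB_ne_nil _ _)]
  simp

-- ===== VERDICT (by name: the statement is the Claim_ definition above) =====
theorem parse_custom_line_spec : Claim_equal_parse_custom_line := by
  intro line _
  unfold Spec_parse_custom_line
  exact parse_custom_line_eq line
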